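-- pv_equiv track=rewrite | github.com/jordenxue/efficient-text-processing-tool | Scripts/build_character_query_aliases.py | merge_aliases
-- ===== SOURCE A (Python) =====
-- def is_blocked(alias: str, canonical: str, blocked_pairs: set[tuple[str, str]]) -> bool:
--     return tuple(sorted((alias, canonical))) in blocked_pairs
--
-- def merge_aliases(
--     blocked_pairs: set[tuple[str, str]],
--     manual_confirmed: dict[str, str],
--     auto_alias_map: dict[str, str],
--     query_only_nicknames: dict[str, str],
-- ) -> dict[str, str]:
--     final_map: dict[str, str] = {}
--
--     for alias, canonical in manual_confirmed.items():
--         if is_blocked(alias, canonical, blocked_pairs):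
--             continue
--         final_map[alias] = canonical
--
--     for alias, canonical in auto_alias_map.items():
--         if is_blocked(alias, canonical, blocked_pairs):
--             continue
--         final_map.setdefault(alias, canonical)
--
--     for alias, canonical in query_only_nicknames.items():
--         if is_blocked(alias, canonical, blocked_pairs):
--             continue
--         final_map[alias] = canonical
--
--     return dict(sorted(final_map.items(), key=lambda x: x[0]))
-- ===== SOURCE B (Python) =====
-- def merge_aliases(
--     blocked_pairs: set[tuple[str, str]],
--     manual_confirmed: dict[str, str],
--     auto_alias_map: dict[str, str],
--     query_only_nicknames: dict[str, str],
-- ) -> dict[str, str]: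
--     # Single per-alias precedence pass: for each alias in the union of keys,
--     # take the value from the first source (query > manual > auto) whose pair
--     # is not blocked; emit in sorted key order.
--     sources = (query_only_nicknames, manual_confirmed, auto_alias_map)
--     keys = set(query_only_nicknames) | set(manual_confirmed) | set(auto_alias_map)
--     result: dict[str, str] = {}
--     for alias in sorted(keys):
--         for src in sources:
--             if alias in src:
--                 canonical = src[alias]
--                 if (min(alias, canonical), max(alias, canonical)) not in blocked_pairs:
--                     result[alias] = canonical
--                     break
--     return result
-- ===== Notes on version B (the rewrite author's own statement) =====
-- stated objective: alternative
-- what changed: A populates one dict in three sequential passes (insert for manual, setdefault for auto, overwriting insert for query-only) and sorts at the end; B makes a single per-alias pass over the sorted union of keys, taking for each alias the value of the first source in priority order query > manual > auto whose pair passes the blocked check.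
import Mathlib
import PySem

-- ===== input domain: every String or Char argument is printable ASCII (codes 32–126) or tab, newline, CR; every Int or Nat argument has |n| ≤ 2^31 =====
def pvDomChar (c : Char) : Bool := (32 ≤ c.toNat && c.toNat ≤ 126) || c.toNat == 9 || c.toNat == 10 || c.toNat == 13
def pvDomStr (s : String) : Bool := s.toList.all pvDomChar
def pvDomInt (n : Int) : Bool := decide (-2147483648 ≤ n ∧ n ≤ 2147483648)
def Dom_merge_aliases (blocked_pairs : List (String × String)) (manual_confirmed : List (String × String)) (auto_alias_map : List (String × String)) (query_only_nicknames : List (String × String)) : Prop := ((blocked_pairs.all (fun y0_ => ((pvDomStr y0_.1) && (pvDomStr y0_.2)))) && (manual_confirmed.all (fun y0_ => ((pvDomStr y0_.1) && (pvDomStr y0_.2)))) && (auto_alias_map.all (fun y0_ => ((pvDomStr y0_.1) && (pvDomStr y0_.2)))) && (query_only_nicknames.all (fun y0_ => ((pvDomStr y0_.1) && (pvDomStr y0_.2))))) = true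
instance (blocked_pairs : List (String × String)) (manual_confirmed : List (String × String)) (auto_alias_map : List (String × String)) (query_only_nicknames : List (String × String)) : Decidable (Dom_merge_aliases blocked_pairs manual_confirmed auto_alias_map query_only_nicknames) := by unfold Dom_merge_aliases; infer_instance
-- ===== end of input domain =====

-- B replaces A's three sequential populate passes (insert / setdefault / insert) by one
-- per-alias precedence pass over the sorted union of keys (objective: alternative decomposition).

-- ===== PORT A =====
-- is_blocked(al, canonical, blocked_pairs): tuple(sorted((al, canonical))) in blocked_pairs
def is_blocked (al : String) (canonical : String) (blocked_pairs : List (String × String)) : Bool :=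
  let s := PySem.List.sorted [al, canonical] (fun x => x) false
  blocked_pairs.contains (s[0]!, s[1]!)

def merge_aliases (blocked_pairs : List (String × String)) (manual_confirmed : List (String × String)) (auto_alias_map : List (String × String)) (query_only_nicknames : List (String × String)) : List (String × String) :=
  let fm1 : PySem.Dict String String :=
    manual_confirmed.foldl
      (fun fm p => if is_blocked p.1 p.2 blocked_pairs then fm else fm.insert p.1 p.2)
      PySem.Dict.empty
  let fm2 :=
    auto_alias_map.foldl
      (fun fm p => if is_blocked p.1 p.2 blocked_pairs then fm else fm.setdefault p.1 p.2)
      fm1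
  let fm3 :=
    query_only_nicknames.foldl
      (fun fm p => if is_blocked p.1 p.2 blocked_pairs then fm else fm.insert p.1 p.2)
      fm2
  PySem.List.sorted fm3.items (fun x => x.1) false

-- ===== PORT B =====
-- (min(al, canonical), max(al, canonical)) not in blocked_pairs
def pv_unblocked (al : String) (canonical : String) (blocked_pairs : List (String × String)) : Bool :=
  !(blocked_pairs.contains (min al canonical, max al canonical))

-- src.get(al): first match (dict encodings carry unique keys, see Pre_)
def pv_get (src : List (String × String)) (al : String) : Option String :=
  (src.find? (fun p => p.1 == al)).map (·.2)

-- the inner 'for src in sources: … break' loop: value of the first source that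
-- contains al with an unblocked pair
def pv_pick (blocked_pairs : List (String × String)) (sources : List (List (String × String))) (al : String) : Option String :=
  match sources with
  | [] => none
  | src :: rest =>
    match pv_get src al with
    | some canonical =>
      if pv_unblocked al canonical blocked_pairs then some canonical
      else pv_pick blocked_pairs rest al
    | none => pv_pick blocked_pairs rest al

def merge_aliases_alt (blocked_pairs : List (String × String)) (manual_confirmed : List (String × String)) (auto_alias_map : List (String × String)) (query_only_nicknames : List (String × String)) : List (String × String) :=
  let sources := [query_only_nicknames, manual_confirmed, auto_alias_map]
  let keys := PySem.Set.union (PySem.Set.union (PySem.Set.ofList (query_only_nicknames.map (·.1))) (manual_confirmed.map (·.1))) (auto_alias_map.map (·.1))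
  (PySem.List.sorted keys (fun x => x) false).foldl
    (fun result al =>
      match pv_pick blocked_pairs sources al with
      | some canonical => result ++ [(al, canonical)]
      | none => result)
    []

-- ===== PRECONDITION & SPEC =====
-- Pre_ excludes association lists with duplicate keys in the three dict arguments: a Python
-- dict never has them, so such lists encode no Python input (the assoc-list reading of a dict
-- would be ambiguous there).
def Pre_merge_aliases (blocked_pairs : List (String × String)) (manual_confirmed : List (String × String)) (auto_alias_map : List (String × String)) (query_only_nicknames : List (String × String)) : Prop :=
  (manual_confirmed.map (·.1)).Nodup ∧ (auto_alias_map.map (·.1)).Nodup ∧ (query_only_nicknames.map (·.1)).Nodup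
instance (blocked_pairs : List (String × String)) (manual_confirmed : List (String × String)) (auto_alias_map : List (String × String)) (query_only_nicknames : List (String × String)) : Decidable (Pre_merge_aliases blocked_pairs manual_confirmed auto_alias_map query_only_nicknames) := by unfold Pre_merge_aliases; infer_instance

def pvWitness_merge_aliases : (List (String × String)) × (List (String × String)) × (List (String × String)) × (List (String × String)) :=
  ([("a", "b")], [("x", "y")], [("x", "z"), ("q", "r")], [("q", "b")])

def Spec_merge_aliases (blocked_pairs : List (String × String)) (manual_confirmed : List (String × String)) (auto_alias_map : List (String × String)) (query_only_nicknames : List (String × String)) (out : List (String × String)) : Prop := out = merge_aliases_alt blocked_pairs manual_confirmed auto_alias_map query_only_nicknames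
instance (blocked_pairs : List (String × String)) (manual_confirmed : List (String × String)) (auto_alias_map : List (String × String)) (query_only_nicknames : List (String × String)) (out : List (String × String)) : Decidable (Spec_merge_aliases blocked_pairs manual_confirmed auto_alias_map query_only_nicknames out) := by unfold Spec_merge_aliases; infer_instance

-- ===== CLAIM (what is proved, stated in full; the proofs are below) =====
def Claim_equal_merge_aliases : Prop := ∀ (blocked_pairs : List (String × String)) (manual_confirmed : List (String × String)) (auto_alias_map : List (String × String)) (query_only_nicknames : List (String × String)), Dom_merge_aliases blocked_pairs manual_confirmed auto_alias_map query_only_nicknames → Pre_merge_aliases blocked_pairs manual_confirmed auto_alias_map query_only_nicknames → Spec_merge_aliases blocked_pairs manual_confirmed auto_alias_map query_only_nicknames (merge_aliases blocked_pairs manual_confirmed auto_alias_map query_only_nicknames)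

-- ===== LEMMAS AND PROOFS =====

theorem sorted_pair (a c : String) : PySem.List.sorted [a, c] (fun x => x) false = if c < a then [c, a] else [a, c] := by
  rw [PySem.List.sorted_eq_foldl_insertBy]
  simp [List.foldl, PySem.List.insertBy]

theorem unblocked_eq (a c : String) (bp : List (String × String)) :
    pv_unblocked a c bp = !(is_blocked a c bp) := by
  unfold pv_unblocked is_blocked
  rw [sorted_pair]
  rcases lt_or_ge c a with h | h
  · rw [if_pos h]
    simp [min_eq_right h.le, max_eq_left h.le]
  · rw [if_neg (not_lt.mpr h)]
    simp [min_eq_left h, max_eq_right h]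

def pv_pick1 (bp : List (String × String)) (src : List (String × String)) (k : String) : Option String :=
  match pv_get src k with
  | some v => if pv_unblocked k v bp then some v else none
  | none => none
def pv_orO {α : Type} (a b : Option α) : Option α :=
  match a with
  | some v => some v
  | none => b

theorem pv_orO_none {α : Type} (a : Option α) : pv_orO a none = a := by
  cases a <;> rfl

theorem pick_eq_orO (bp : List (String × String)) (src : List (String × String)) (rest : List (List (String × String))) (k : String) :
    pv_pick bp (src :: rest) k = pv_orO (pv_pick1 bp src k) (pv_pick bp rest k) := by
  cases h : pv_get src k <;> simp [pv_pick, pv_pick1, pv_orO, h]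
  split <;> simp [pv_orO]

theorem get_eq_none_of_not_mem (src : List (String × String)) (k : String) (h : k ∉ src.map (·.1)) :
    pv_get src k = none := by
  simp only [pv_get, Option.map_eq_none_iff, List.find?_eq_none]
  intro p hp
  simp only [beq_iff_eq]
  exact fun he => h (by simpa [he] using List.mem_map_of_mem (f := (·.1)) hp)

theorem get_cons_self (p : String × String) (rest : List (String × String)) :
    pv_get (p :: rest) p.1 = some p.2 := by
  simp [pv_get, List.find?_cons]

theorem get_cons_ne (p : String × String) (rest : List (String × String)) (k : String) (h : k ≠ p.1) :
    pv_get (p :: rest) k = pv_get rest k := by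
  simp [pv_get, List.find?_cons, Ne.symm h]


theorem foldl_insert_get? (bp : List (String × String)) (l : List (String × String)) (d : PySem.Dict String String) (k : String) (h : (l.map (·.1)).Nodup) :
    (l.foldl (fun fm p => if is_blocked p.1 p.2 bp then fm else fm.insert p.1 p.2) d).get? k
      = pv_orO (pv_pick1 bp l k) (d.get? k) := by
  induction l generalizing d with
  | nil => simp [pv_pick1, pv_get, pv_orO]
  | cons p rest ih =>
    simp only [List.map_cons, List.nodup_cons] at h
    rw [List.foldl_cons, ih _ h.2]
    by_cases hk : k = p.1
    · subst hk
      have h1 : pv_pick1 bp rest p.1 = none := by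
        simp [pv_pick1, get_eq_none_of_not_mem rest _ h.1]
      rw [h1]
      have h2 : pv_pick1 bp (p :: rest) p.1 = if pv_unblocked p.1 p.2 bp then some p.2 else none := by
        simp [pv_pick1, get_cons_self]
      rw [h2, unblocked_eq]
      by_cases hb : is_blocked p.1 p.2 bp
      · simp [hb, pv_orO]
      · simp [hb, pv_orO, PySem.Dict.get?_insert_self]
    · have h2 : pv_pick1 bp (p :: rest) k = pv_pick1 bp rest k := by
        simp [pv_pick1, get_cons_ne p rest k hk]
      rw [h2]
      by_cases hb : is_blocked p.1 p.2 bp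
      · simp [hb]
      · simp [hb, PySem.Dict.get?_insert_of_ne d p.2 hk]

theorem foldl_setdefault_get? (bp : List (String × String)) (l : List (String × String)) (d : PySem.Dict String String) (k : String) (h : (l.map (·.1)).Nodup) :
    (l.foldl (fun fm p => if is_blocked p.1 p.2 bp then fm else fm.setdefault p.1 p.2) d).get? k
      = pv_orO (d.get? k) (pv_pick1 bp l k) := by
  induction l generalizing d with
  | nil => simp [pv_pick1, pv_get, pv_orO_none]
  | cons p rest ih =>
    simp only [List.map_cons, List.nodup_cons] at h
    rw [List.foldl_cons, ih _ h.2]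
    by_cases hk : k = p.1
    · subst hk
      have h1 : pv_pick1 bp rest p.1 = none := by
        simp [pv_pick1, get_eq_none_of_not_mem rest _ h.1]
      have h2 : pv_pick1 bp (p :: rest) p.1 = if pv_unblocked p.1 p.2 bp then some p.2 else none := by
        simp [pv_pick1, get_cons_self]
      rw [h1, h2, pv_orO_none, unblocked_eq]
      by_cases hb : is_blocked p.1 p.2 bp
      · simp [hb, pv_orO_none]
      · rw [if_neg (by simp [hb]), PySem.Dict.get?_setdefault_self]
        cases hd : d.get? p.1 <;> simp [pv_orO, hd, hb]
    · have h2 : pv_pick1 bp (p :: rest) k = pv_pick1 bp rest k := by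
        simp [pv_pick1, get_cons_ne p rest k hk]
      rw [h2]
      by_cases hb : is_blocked p.1 p.2 bp
      · simp [hb]
      · simp [hb, PySem.Dict.get?_setdefault_of_ne d p.2 hk]

theorem nodup_keys_setdefault (d : PySem.Dict String String) (k v : String) (h : d.keys.Nodup) :
    (d.setdefault k v).keys.Nodup := by
  by_cases hc : d.contains k
  · rw [PySem.Dict.setdefault_of_contains _ _ hc]; exact h
  · rw [PySem.Dict.setdefault_of_not_contains _ _ (by simpa using hc)]
    exact PySem.Dict.nodup_keys_insert _ _ _ h

theorem nodup_keys_foldl_insert_if (bp : List (String × String)) (l : List (String × String)) (d : PySem.Dict String String) (h : d.keys.Nodup) :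
    (l.foldl (fun fm p => if is_blocked p.1 p.2 bp then fm else fm.insert p.1 p.2) d).keys.Nodup := by
  induction l generalizing d with
  | nil => exact h
  | cons p rest ih =>
    rw [List.foldl_cons]
    apply ih
    split
    · exact h
    · exact PySem.Dict.nodup_keys_insert _ _ _ h

theorem nodup_keys_foldl_setdefault_if (bp : List (String × String)) (l : List (String × String)) (d : PySem.Dict String String) (h : d.keys.Nodup) :
    (l.foldl (fun fm p => if is_blocked p.1 p.2 bp then fm else fm.setdefault p.1 p.2) d).keys.Nodup := by
  induction l generalizing d with
  | nil => exact h
  | cons p rest ih =>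
    rw [List.foldl_cons]
    apply ih
    split
    · exact h
    · exact nodup_keys_setdefault _ _ _ h

theorem foldl_pick_eq_flatMap (f : String → Option String) (S : List String) (acc : List (String × String)) :
    S.foldl (fun r k => match f k with | some v => r ++ [(k, v)] | none => r) acc
      = acc ++ S.flatMap (fun k => match f k with | some v => [(k, v)] | none => []) := by
  induction S generalizing acc with
  | nil => simp
  | cons s S ih => cases hf : f s <;> simp [List.foldl_cons, hf, ih]

theorem pairwise_flatMap_pick (f : String → Option String) (S : List String) (h : S.Pairwise (· < ·)) :
    (S.flatMap (fun k => match f k with | some v => [(k, v)] | none => [])).Pairwise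
      (fun a b : String × String => a.1 < b.1) := by
  induction S with
  | nil => simp
  | cons s S ih =>
    rw [List.flatMap_cons, List.pairwise_append]
    refine ⟨?_, ih (List.pairwise_cons.mp h).2, ?_⟩
    · cases hf : f s <;> simp
    · intro a ha b hb
      have ha1 : a.1 = s := by
        cases hf : f s <;> rw [hf] at ha
        · simp at ha
        · simp at ha; subst ha; rfl
      obtain ⟨k, hk, hbk⟩ := List.mem_flatMap.mp hb
      have hb1 : b.1 = k := by
        cases hf : f k <;> rw [hf] at hbk
        · simp at hbk
        · simp at hbk; subst hbk; rfl
      rw [ha1, hb1]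
      exact (List.pairwise_cons.mp h).1 k hk

theorem mem_flatMap_pick (f : String → Option String) (S : List String) (p : String × String) :
    p ∈ S.flatMap (fun k => match f k with | some v => [(k, v)] | none => [])
      ↔ p.1 ∈ S ∧ f p.1 = some p.2 := by
  simp only [List.mem_flatMap]
  constructor
  · rintro ⟨k, hk, hp⟩
    cases hf : f k <;> rw [hf] at hp
    · simp at hp
    · simp at hp; subst hp; exact ⟨hk, hf⟩
  · rintro ⟨h1, h2⟩
    exact ⟨p.1, h1, by rw [h2]; simp⟩

theorem pick1_some_mem (bp : List (String × String)) (src : List (String × String)) (k v : String)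
    (h : pv_pick1 bp src k = some v) : k ∈ src.map (·.1) := by
  unfold pv_pick1 at h
  cases hg : pv_get src k <;> rw [hg] at h
  · simp at h
  · obtain ⟨q, hq, -⟩ := Option.map_eq_some_iff.mp hg
    have hqk : q.1 = k := by simpa using List.find?_some hq
    exact hqk ▸ List.mem_map_of_mem (List.mem_of_find?_eq_some hq)

theorem merge_aliases_spec : Claim_equal_merge_aliases := by
  intro bp mc am qn _ hpre
  obtain ⟨hmc, ham, hqn⟩ := hpre
  unfold Spec_merge_aliases
  simp only [merge_aliases, merge_aliases_alt]
  rw [foldl_pick_eq_flatMap, List.nil_append]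
  -- abbreviations
  have hkeysNodup : (PySem.Set.union (PySem.Set.union (PySem.Set.ofList (qn.map (·.1))) (mc.map (·.1))) (am.map (·.1))).Nodup :=
    PySem.Set.nodup_union _ _ (PySem.Set.nodup_union _ _ (PySem.Set.nodup_ofList _))
  have hSpair : (PySem.List.sorted (PySem.Set.union (PySem.Set.union (PySem.Set.ofList (qn.map (·.1))) (mc.map (·.1))) (am.map (·.1))) (fun x => x) false).Pairwise (· < ·) := by
    have h1 := PySem.List.sorted_pairwise (PySem.Set.union (PySem.Set.union (PySem.Set.ofList (qn.map (·.1))) (mc.map (·.1))) (am.map (·.1))) (fun x => x)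
    have h2 : (PySem.List.sorted (PySem.Set.union (PySem.Set.union (PySem.Set.ofList (qn.map (·.1))) (mc.map (·.1))) (am.map (·.1))) (fun x => x) false).Nodup :=
      ((PySem.List.sorted_perm _ _ _).nodup_iff).mpr hkeysNodup
    exact (h1.and h2).imp (fun hab => lt_of_le_of_ne hab.1 hab.2)
  have hnodup3 : (qn.foldl (fun fm p => if is_blocked p.1 p.2 bp then fm else fm.insert p.1 p.2)
      (am.foldl (fun fm p => if is_blocked p.1 p.2 bp then fm else fm.setdefault p.1 p.2)
        (mc.foldl (fun fm p => if is_blocked p.1 p.2 bp then fm else fm.insert p.1 p.2) PySem.Dict.empty))).keys.Nodup :=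
    nodup_keys_foldl_insert_if _ _ _ (nodup_keys_foldl_setdefault_if _ _ _
      (nodup_keys_foldl_insert_if _ _ _ (by simp [PySem.Dict.keys_empty])))
  have hget : ∀ k, (qn.foldl (fun fm p => if is_blocked p.1 p.2 bp then fm else fm.insert p.1 p.2)
      (am.foldl (fun fm p => if is_blocked p.1 p.2 bp then fm else fm.setdefault p.1 p.2)
        (mc.foldl (fun fm p => if is_blocked p.1 p.2 bp then fm else fm.insert p.1 p.2) PySem.Dict.empty))).get? k
        = pv_pick bp [qn, mc, am] k := by
    intro k
    rw [foldl_insert_get? bp qn _ k hqn, foldl_setdefault_get? bp am _ k ham,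
        foldl_insert_get? bp mc _ k hmc, pick_eq_orO, pick_eq_orO, pick_eq_orO]
    simp only [pv_pick, PySem.Dict.get?_empty, pv_orO_none]
  apply PySem.List.sorted_eq_of_perm_of_pairwise_lt
  · rw [List.perm_ext_iff_of_nodup
      ((pairwise_flatMap_pick _ _ hSpair).imp (fun hab => by intro he; rw [he] at hab; exact lt_irrefl _ hab))
      (List.Nodup.of_map (fun x => x.1) (by simpa only [PySem.Dict.keys] using hnodup3))]
    intro p
    rw [mem_flatMap_pick]
    constructor
    · rintro ⟨-, hp⟩
      exact (PySem.Dict.get?_eq_some_iff_mem_items _ _ _ hnodup3).mp ((hget p.1).symm ▸ hp)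
    · intro hp
      have hsome : pv_pick bp [qn, mc, am] p.1 = some p.2 :=
        (hget p.1) ▸ (PySem.Dict.get?_eq_some_iff_mem_items _ _ _ hnodup3).mpr hp
      refine ⟨?_, hsome⟩
      rw [PySem.List.mem_sorted, PySem.Set.mem_union, PySem.Set.mem_union, PySem.Set.mem_ofList]
      rw [pick_eq_orO, pick_eq_orO, pick_eq_orO] at hsome
      simp only [pv_pick, pv_orO_none] at hsome
      cases h1 : pv_pick1 bp qn p.1 with
      | some v => exact Or.inl (Or.inl (pick1_some_mem _ _ _ _ h1))
      | none =>
        rw [h1] at hsome; simp only [pv_orO] at hsome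
        cases h2 : pv_pick1 bp mc p.1 with
        | some v => exact Or.inl (Or.inr (pick1_some_mem _ _ _ _ h2))
        | none =>
          rw [h2] at hsome; simp only [pv_orO] at hsome
          exact Or.inr (pick1_some_mem _ _ _ _ hsome)
  · exact pairwise_flatMap_pick _ _ hSpair
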